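-- pv_equiv track=rewrite | github.com/Hyun010/algorithm | 프로그래머스/2/12923. 숫자 블록/숫자 블록.py | solution
-- ===== SOURCE A (Python) =====
-- def solution(begin, end):
--     answer = []
--     for position in range(begin, end + 1):
--         if position == 1: #1번 항상 0
--             answer.append(0)
--             continue
--         block = 1 #초기값 1
--         limit = int(position**0.5) #효율성->제곱근까지만 탐색
--         for divisor in range(2, limit + 1):
--             if position % divisor == 0: #약수를 찾으면
--                 paired_divisor = position // divisor
--                 if paired_divisor <= 10000000: #블록 제한 조건 확인
--                     block = max(block, paired_divisor)
--                     break
--                 block = max(block, divisor)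
--         answer.append(block)
--     return answer
-- ===== SOURCE B (Python) =====
-- def solution(begin, end):
--     answer = []
--     for position in range(begin, end + 1):
--         divisors = set()
--         limit = int(position ** 0.5)
--         for d in range(1, limit + 1):
--             if position % d == 0:
--                 divisors.add(d)
--                 divisors.add(position // d)
--         valid = [d for d in divisors if d < position and d <= 10000000]
--         answer.append(max(valid) if valid else 0)
--     return answer
-- ===== Notes on version B (the rewrite author's own statement) =====
-- stated objective: alternative
-- what changed: B replaces A's smallest-factor early-break scan (largest block = position // first divisor whose cofactor fits the cap) by building the full divisor set from trial divisions up to sqrt(position) and then, in a separate pass, taking the maximum divisor that is < position and <= 10^7 (0 if none).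
-- intended difference: When the range contains position 0 (begin = 0 <= end), A appends 1 at position 0 -- the leftover initial block value, since int(0**0.5)=0 makes its divisor loop empty -- while B appends 0 because 0 has no divisor d with d < 0, matching the intended 'no valid block' answer used for position 1. — e.g. on solution(0, 0): A returns [1], B returns [0]
import Mathlib
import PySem

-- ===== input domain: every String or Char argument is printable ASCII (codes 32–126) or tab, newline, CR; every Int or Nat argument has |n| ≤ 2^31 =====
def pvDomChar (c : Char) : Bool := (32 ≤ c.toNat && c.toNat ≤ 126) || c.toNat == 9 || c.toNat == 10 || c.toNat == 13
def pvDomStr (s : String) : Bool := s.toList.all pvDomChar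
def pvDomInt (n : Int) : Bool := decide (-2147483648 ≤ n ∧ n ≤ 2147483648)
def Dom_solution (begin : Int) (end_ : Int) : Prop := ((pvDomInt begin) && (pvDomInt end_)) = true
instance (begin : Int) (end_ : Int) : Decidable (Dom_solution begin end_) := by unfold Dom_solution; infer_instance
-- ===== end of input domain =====

-- B builds the full divisor set up to √position and takes the max valid divisor in a second
-- pass, instead of A's early-break smallest-factor scan; same asymptotic cost (alternative).

-- ===== PORT A =====
-- inner 'for divisor in range(2, limit+1)' loop with its break, over the remaining range
def solnLoopA (p : Int) : List Int → Int → Int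
  | [], block => block
  | d :: rest, block =>
    if PySem.Int.mod p d = 0 then
      let paired := PySem.Int.floordiv p d
      if paired ≤ 10000000 then max block paired
      else solnLoopA p rest (max block d)
    else solnLoopA p rest block

-- one iteration of A's outer loop (the value appended for 'position')
def solnBodyA (position : Int) : Int :=
  if position = 1 then 0
  else
    -- int(position**0.5): exact as Nat.sqrt for 0 ≤ position ≤ 2^31 (checked exhaustively);
    -- negative positions raise TypeError in Python and are excluded by Pre_solution
    let limit : Int := (position.toNat.sqrt : Int)
    solnLoopA position (PySem.List.pyRange 2 (limit + 1) 1) 1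

def solution (begin : Int) (end_ : Int) : List Int :=
  (PySem.List.pyRange begin (end_ + 1) 1).foldl (fun answer position => answer ++ [solnBodyA position]) []

-- ===== PORT B =====
-- one iteration of B's outer loop: collect all divisors (d and position//d for d ≤ √position)
-- into a set, then take the max of those < position and ≤ 10^7 (0 if none)
def solnBodyB (position : Int) : Int :=
  let limit : Int := (position.toNat.sqrt : Int)   -- int(position**0.5), as in port A
  let divisors : PySem.Set Int :=
    (PySem.List.pyRange 1 (limit + 1) 1).foldl
      (fun s d =>
        if PySem.Int.mod position d = 0 then
          PySem.Set.add (PySem.Set.add s d) (PySem.Int.floordiv position d)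
        else s)
      PySem.Set.empty
  let valid : List Int := divisors.filter (fun d => decide (d < position) && decide (d ≤ 10000000))
  -- max(valid) if valid else 0 (max of distinct ints: independent of set order)
  match PySem.List.max? valid (fun x => x) with
  | some m => m
  | none => 0

def solution_alt (begin : Int) (end_ : Int) : List Int :=
  (PySem.List.pyRange begin (end_ + 1) 1).foldl (fun answer position => answer ++ [solnBodyB position]) []

-- ===== PRECONDITION & SPEC =====
-- Pre_ excludes exactly the inputs where A raises: a nonempty range starting below 0 makes
-- position**0.5 a complex number and int(...) raise TypeError.
def Pre_solution (begin : Int) (end_ : Int) : Prop := 0 ≤ begin ∨ end_ < begin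
instance (begin : Int) (end_ : Int) : Decidable (Pre_solution begin end_) := by unfold Pre_solution; infer_instance
def pvWitness_solution : Int × Int := (1, 10)

-- When the range contains position 0 (begin = 0 ≤ end), A appends 1 at position 0 — the leftover
-- initial block value (its divisor loop is empty) — while B appends 0, the intended 'no valid
-- block' answer (0 has no divisor d with d < 0), as for position 1.
def D_solution (begin : Int) (end_ : Int) : Prop := begin = 0 ∧ 0 ≤ end_
instance (begin : Int) (end_ : Int) : Decidable (D_solution begin end_) := by unfold D_solution; infer_instance

def Spec_solution (begin : Int) (end_ : Int) (out : List Int) : Prop := ¬ D_solution begin end_ → out = solution_alt begin end_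
instance (begin : Int) (end_ : Int) (out : List Int) : Decidable (Spec_solution begin end_ out) := by unfold Spec_solution; infer_instance

def pvDiffWitness_solution : Int × Int := (0, 0)
def pvDiffWitnessOut_solution : (List Int) × (List Int) := ([1], [0])

-- ===== CLAIM (what is proved, stated in full; the proofs are below) =====
def Claim_unchanged_solution : Prop := ∀ (begin : Int) (end_ : Int), Dom_solution begin end_ → Pre_solution begin end_ → Spec_solution begin end_ (solution begin end_)
def Claim_changed_solution : Prop := Dom_solution (pvDiffWitness_solution.1) (pvDiffWitness_solution.2) ∧ Pre_solution (pvDiffWitness_solution.1) (pvDiffWitness_solution.2) ∧ D_solution (pvDiffWitness_solution.1) (pvDiffWitness_solution.2) ∧ solution (pvDiffWitness_solution.1) (pvDiffWitness_solution.2) = pvDiffWitnessOut_solution.1 ∧ solution_alt (pvDiffWitness_solution.1) (pvDiffWitness_solution.2) = pvDiffWitnessOut_solution.2 ∧ pvDiffWitnessOut_solution.1 ≠ pvDiffWitnessOut_solution.2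
def Claim_exact_solution : Prop := ∀ (begin : Int) (end_ : Int), Dom_solution begin end_ → Pre_solution begin end_ → D_solution begin end_ → solution begin end_ ≠ solution_alt begin end_

-- ===== LEMMAS AND PROOFS =====

-- V p d: d is a valid block for position p
def ValidDiv (p d : Int) : Prop := d ∣ p ∧ 1 ≤ d ∧ d < p ∧ d ≤ 10000000

-- basic facts about the cofactor p / d of a positive divisor
theorem cofacts {p d : Int} (hp : 0 < p) (hd1 : 1 ≤ d) (hd : d ∣ p) :
    1 ≤ p / d ∧ (p / d) ∣ p ∧ p / (p / d) = d ∧ (p / d) * d = p := by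
  have hmul : (p / d) * d = p := Int.ediv_mul_cancel hd
  have hq1 : 1 ≤ p / d := by nlinarith [hmul]
  refine ⟨hq1, ⟨d, by linarith [hmul]⟩, ?_, hmul⟩
  have hne : p / d ≠ 0 := by omega
  calc p / (p / d) = ((p / d) * d) / (p / d) := by rw [hmul]
    _ = d := by rw [mul_comm]; exact Int.mul_ediv_cancel d hne

-- a divisor d ≤ √p has cofactor ≥ √p
theorem cofactor_large {p s d : Int} (_hp : 0 < p) (hss : s * s ≤ p)
    (hd1 : 1 ≤ d) (hds : d ≤ s) (hd : d ∣ p) : s ≤ p / d := by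
  have hmul : (p / d) * d = p := Int.ediv_mul_cancel hd
  nlinarith [hmul]

-- a divisor e > √p has cofactor ≤ √p
theorem cofactor_small {p s e : Int} (hp : 0 < p) (hs0 : 0 ≤ s)
    (hlt : p < (s + 1) * (s + 1))
    (he1 : 1 ≤ e) (hes : s < e) (he : e ∣ p) : p / e ≤ s := by
  have hmul : (p / e) * e = p := Int.ediv_mul_cancel he
  have hq1 : 1 ≤ p / e := by nlinarith [hmul]
  by_contra hgt
  have : (s + 1) * (s + 1) ≤ (p / e) * e :=
    mul_le_mul (by omega) (by omega) (by omega) (by omega)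
  omega

-- cofactors are antitone among positive divisors
theorem cofactor_anti {p c k : Int} (hp : 0 < p) (hk1 : 1 ≤ k) (hkc : k ≤ c)
    (hc : c ∣ p) (hk : k ∣ p) : p / c ≤ p / k := by
  have hmc : (p / c) * c = p := Int.ediv_mul_cancel hc
  have hmk : (p / k) * k = p := Int.ediv_mul_cancel hk
  have h1 : 1 ≤ p / c := by nlinarith [hmc]
  nlinarith [hmc, hmk]

-- A's inner loop, started at k with accumulator b, computes the greatest valid block
theorem loopA_greatest (p s : Int) (hp : 2 ≤ p) (hss : s * s ≤ p)
    (hlt : p < (s + 1) * (s + 1)) (hsC : s ≤ 10000000) :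
    ∀ (m : Nat) (k b : Int), (s + 1 - k).toNat = m → 2 ≤ k → k ≤ s + 1 →
      (∀ d : Int, 2 ≤ d → d < k → d ∣ p → ¬ (p / d ≤ 10000000)) →
      ValidDiv p b → (∀ d : Int, d ∣ p → 2 ≤ d → d < k → d ≤ b) → b ≤ s →
      IsGreatest {x | ValidDiv p x} (solnLoopA p (PySem.List.pyRange k (s + 1) 1) b) := by
  have hp0 : (0 : Int) < p := by omega
  have hs1 : 1 ≤ s := by nlinarith
  have hsp : s < p := by nlinarith
  intro m
  induction m with
  | zero =>
    intro k b hm hk2 hks hnone hbV hub hbs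
    rw [PySem.List.pyRange_one_eq_nil (by omega : s + 1 ≤ k)]
    simp only [solnLoopA]
    refine ⟨hbV, ?_⟩
    rintro e ⟨he, he1, hep, heC⟩
    by_cases hse : e ≤ s
    · rcases Int.lt_or_le e 2 with h2 | h2
      · have : e = 1 := by omega
        have := hbV.2.1
        omega
      · exact hub e he h2 (by omega)
    · obtain ⟨hc1, hcdvd, hcc, hcm⟩ := cofacts hp0 he1 he
      have hcs : p / e ≤ s := cofactor_small hp0 (by omega) hlt he1 (by omega) he
      have hc2 : 2 ≤ p / e := by
        rcases Int.lt_or_le (p / e) 2 with h | h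
        · have : p / e = 1 := by omega
          rw [this, Int.ediv_one] at hcc
          omega
        · exact h
      exact absurd (show p / (p / e) ≤ 10000000 by rw [hcc]; exact heC) (hnone (p / e) hc2 (by omega) hcdvd)
  | succ m ih =>
    intro k b hm hk2 hks hnone hbV hub hbs
    rw [PySem.List.pyRange_one_cons (by omega : k < s + 1)]
    have hfd : PySem.Int.floordiv p k = p / k :=
      PySem.Int.floordiv_eq_ediv_of_pos (by omega)
    by_cases hdvd : PySem.Int.mod p k = 0
    · have hkdvd : k ∣ p := (PySem.Int.mod_eq_zero_iff_dvd p k).mp hdvd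
      obtain ⟨hq1, hqdvd, hqq, hqm⟩ := cofacts hp0 (by omega) hkdvd
      have hqs : s ≤ p / k := cofactor_large hp0 hss (by omega) (by omega) hkdvd
      by_cases hcap : p / k ≤ 10000000
      · have hstep : solnLoopA p (k :: PySem.List.pyRange (k + 1) (s + 1) 1) b
            = max b (p / k) := by
          simp only [solnLoopA, hdvd, hfd, if_pos]
          rw [if_pos hcap]
        rw [hstep, max_eq_right (by omega : b ≤ p / k)]
        have hqp : p / k < p := by
          have h2q : 2 * (p / k) ≤ (p / k) * k := by nlinarith
          omega
        refine ⟨⟨hqdvd, by omega, hqp, hcap⟩, ?_⟩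
        rintro e ⟨he, he1, hep, heC⟩
        by_cases hse : e ≤ s
        · omega
        · obtain ⟨hc1, hcdvd, hcc, hcm⟩ := cofacts hp0 he1 he
          have hcs : p / e ≤ s := cofactor_small hp0 (by omega) hlt he1 (by omega) he
          have hc2 : 2 ≤ p / e := by
            rcases Int.lt_or_le (p / e) 2 with h | h
            · have : p / e = 1 := by omega
              rw [this, Int.ediv_one] at hcc
              omega
            · exact h
          rcases Int.lt_or_le (p / e) k with hlk | hgk
          · exact absurd (show p / (p / e) ≤ 10000000 by rw [hcc]; exact heC) (hnone (p / e) hc2 hlk hcdvd)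
          · have := cofactor_anti hp0 (by omega : (1:Int) ≤ k) hgk hcdvd hkdvd
            rw [hcc] at this
            omega
      · have hstep : solnLoopA p (k :: PySem.List.pyRange (k + 1) (s + 1) 1) b
            = solnLoopA p (PySem.List.pyRange (k + 1) (s + 1) 1) (max b k) := by
          simp only [solnLoopA, hdvd, hfd, if_pos]
          rw [if_neg hcap]
        rw [hstep]
        refine ih (k + 1) (max b k) (by omega) (by omega) (by omega) ?_ ?_ ?_ (by omega)
        · intro d hd2 hdk hddvd
          rcases Int.lt_or_le d k with h | h
          · exact hnone d hd2 h hddvd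
          · have : d = k := by omega
            subst this
            exact hcap
        · rcases max_choice b k with h | h <;> rw [h]
          · exact hbV
          · exact ⟨hkdvd, by omega, by omega, by omega⟩
        · intro d hddvd hd2 hdk
          rcases Int.lt_or_le d k with h | h
          · have := hub d hddvd hd2 h
            omega
          · have : d = k := by omega
            omega
    · have hstep : solnLoopA p (k :: PySem.List.pyRange (k + 1) (s + 1) 1) b
          = solnLoopA p (PySem.List.pyRange (k + 1) (s + 1) 1) b := by
        simp only [solnLoopA]
        rw [if_neg hdvd]
      rw [hstep]
      have hknd : ¬ k ∣ p := fun h => hdvd ((PySem.Int.mod_eq_zero_iff_dvd p k).mpr h)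
      refine ih (k + 1) b (by omega) (by omega) (by omega) ?_ hbV ?_ hbs
      · intro d hd2 hdk hddvd
        rcases Int.lt_or_le d k with h | h
        · exact hnone d hd2 h hddvd
        · have : d = k := by omega
          subst this
          exact absurd hddvd hknd
      · intro d hddvd hd2 hdk
        rcases Int.lt_or_le d k with h | h
        · exact hub d hddvd hd2 h
        · have : d = k := by omega
          subst this
          exact absurd hddvd hknd

-- membership in B's divisor-set accumulator
theorem divs_mem_aux (p : Int) (L : List Int) (s0 : PySem.Set Int) (x : Int) :
    (x ∈ L.foldl (fun s d => if PySem.Int.mod p d = 0 then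
        PySem.Set.add (PySem.Set.add s d) (PySem.Int.floordiv p d) else s) s0) ↔
      x ∈ s0 ∨ ∃ d ∈ L, PySem.Int.mod p d = 0 ∧ (x = d ∨ x = PySem.Int.floordiv p d) := by
  induction L generalizing s0 with
  | nil => simp
  | cons a t ih =>
    simp only [List.foldl_cons]
    by_cases h : PySem.Int.mod p a = 0
    · rw [if_pos h, ih]
      simp only [PySem.Set.mem_add, List.mem_cons]
      constructor
      · rintro (((h0 | h1) | h2) | ⟨d, hd, hm, hx⟩)
        · exact Or.inl h0
        · exact Or.inr ⟨a, Or.inl rfl, h, Or.inl h1⟩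
        · exact Or.inr ⟨a, Or.inl rfl, h, Or.inr h2⟩
        · exact Or.inr ⟨d, Or.inr hd, hm, hx⟩
      · rintro (h0 | ⟨d, (rfl | hd), hm, hx⟩)
        · exact Or.inl (Or.inl (Or.inl h0))
        · rcases hx with h1 | h2
          · exact Or.inl (Or.inl (Or.inr h1))
          · exact Or.inl (Or.inr h2)
        · exact Or.inr ⟨d, hd, hm, hx⟩
    · rw [if_neg h, ih]
      constructor
      · rintro (h0 | ⟨d, hd, hm, hx⟩)
        · exact Or.inl h0
        · exact Or.inr ⟨d, List.mem_cons_of_mem a hd, hm, hx⟩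
      · rintro (h0 | ⟨d, hd, hm, hx⟩)
        · exact Or.inl h0
        · rcases List.mem_cons.mp hd with rfl | hd'
          · exact absurd hm h
          · exact Or.inr ⟨d, hd', hm, hx⟩

-- B's body computes the greatest valid block
theorem bodyB_greatest (p : Int) (hp : 2 ≤ p) (h2 : p ≤ 2147483649) :
    IsGreatest {x | ValidDiv p x} (solnBodyB p) := by
  have hp0 : (0 : Int) < p := by omega
  have hptn : ((p.toNat : Int)) = p := Int.toNat_of_nonneg (by omega)
  set s : Int := (p.toNat.sqrt : Int) with hsdef
  have hss : s * s ≤ p := by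
    have h := Nat.sqrt_le' p.toNat
    have h' : ((p.toNat.sqrt ^ 2 : Nat) : Int) ≤ ((p.toNat : Nat) : Int) := by exact_mod_cast h
    push_cast at h'
    nlinarith [h']
  have hlt : p < (s + 1) * (s + 1) := by
    have h := Nat.lt_succ_sqrt' p.toNat
    have h' : ((p.toNat : Nat) : Int) < (((p.toNat.sqrt.succ) ^ 2 : Nat) : Int) := by exact_mod_cast h
    push_cast at h'
    nlinarith [h']
  have hs1 : 1 ≤ s := by nlinarith
  have hsp : s < p := by nlinarith
  have hmem : ∀ x : Int, (x ∈ (PySem.List.pyRange 1 (s + 1) 1).foldl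
      (fun t d => if PySem.Int.mod p d = 0 then
        PySem.Set.add (PySem.Set.add t d) (PySem.Int.floordiv p d) else t)
      PySem.Set.empty) ↔ (x ∣ p ∧ 1 ≤ x ∧ x ≤ p) := by
    intro x
    rw [divs_mem_aux]
    constructor
    · rintro (h0 | ⟨d, hdL, hdmod, hx⟩)
      · simp [PySem.Set.empty] at h0
      · obtain ⟨hd1, hds⟩ := PySem.List.mem_pyRange_one.mp hdL
        have hddvd : d ∣ p := (PySem.Int.mod_eq_zero_iff_dvd p d).mp hdmod
        have hfd : PySem.Int.floordiv p d = p / d :=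
          PySem.Int.floordiv_eq_ediv_of_pos (by omega)
        obtain ⟨hq1, hqdvd, hqq, hqm⟩ := cofacts hp0 hd1 hddvd
        rcases hx with rfl | rfl
        · exact ⟨hddvd, hd1, by omega⟩
        · rw [hfd]
          refine ⟨hqdvd, hq1, ?_⟩
          nlinarith [hqm]
    · rintro ⟨hxd, hx1, hxp⟩
      right
      by_cases hxs : x ≤ s
      · exact ⟨x, PySem.List.mem_pyRange_one.mpr ⟨hx1, by omega⟩,
          (PySem.Int.mod_eq_zero_iff_dvd p x).mpr hxd, Or.inl rfl⟩
      · obtain ⟨hq1, hqdvd, hqq, hqm⟩ := cofacts hp0 hx1 hxd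
        have hqs : p / x ≤ s := cofactor_small hp0 (by omega) hlt hx1 (by omega) hxd
        refine ⟨p / x, PySem.List.mem_pyRange_one.mpr ⟨hq1, by omega⟩,
          (PySem.Int.mod_eq_zero_iff_dvd p (p / x)).mpr hqdvd, Or.inr ?_⟩
        rw [PySem.Int.floordiv_eq_ediv_of_pos (by omega), hqq]
  unfold solnBodyB
  rw [← hsdef]
  simp only
  set valid : List Int := (((PySem.List.pyRange 1 (s + 1) 1).foldl
      (fun t d => if PySem.Int.mod p d = 0 then
        PySem.Set.add (PySem.Set.add t d) (PySem.Int.floordiv p d) else t)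
      PySem.Set.empty : PySem.Set Int) : List Int).filter
      (fun d => decide (d < p) && decide (d ≤ 10000000)) with hvdef
  have hvmem : ∀ x : Int, x ∈ valid ↔ ValidDiv p x := by
    intro x
    rw [hvdef, List.mem_filter]
    unfold ValidDiv
    rw [hmem x]
    constructor
    · rintro ⟨⟨hd, h1, hle⟩, hb⟩
      simp only [Bool.and_eq_true, decide_eq_true_eq] at hb
      exact ⟨hd, h1, hb.1, hb.2⟩
    · rintro ⟨hd, h1, hlt', hC⟩
      refine ⟨⟨hd, h1, by omega⟩, ?_⟩
      simp only [Bool.and_eq_true, decide_eq_true_eq]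
      exact ⟨hlt', hC⟩
  have h1v : (1 : Int) ∈ valid := (hvmem 1).mpr ⟨one_dvd p, le_refl 1, by omega, by omega⟩
  cases hmax : PySem.List.max? valid (fun x => x) with
  | none =>
    rw [PySem.List.max?_eq_none_iff] at hmax
    rw [hmax] at h1v
    simp at h1v
  | some m =>
    refine ⟨(hvmem m).mp (PySem.List.max?_mem hmax), ?_⟩
    intro e heV
    exact PySem.List.max?_isMax hmax e ((hvmem e).mpr heV)

theorem body_eq (p : Int) (h1 : 1 ≤ p) (h2 : p ≤ 2147483648 + 1) :
    solnBodyA p = solnBodyB p := by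
  rcases eq_or_lt_of_le h1 with h | h
  · rw [← h]
    decide
  · have hp : 2 ≤ p := by omega
    have hp0 : (0 : Int) < p := by omega
    have hptn : ((p.toNat : Int)) = p := Int.toNat_of_nonneg (by omega)
    set s : Int := (p.toNat.sqrt : Int) with hsdef
    have hss : s * s ≤ p := by
      have hh := Nat.sqrt_le' p.toNat
      have h' : ((p.toNat.sqrt ^ 2 : Nat) : Int) ≤ ((p.toNat : Nat) : Int) := by exact_mod_cast hh
      push_cast at h'
      nlinarith [h']
    have hlt : p < (s + 1) * (s + 1) := by
      have hh := Nat.lt_succ_sqrt' p.toNat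
      have h' : ((p.toNat : Nat) : Int) < (((p.toNat.sqrt.succ) ^ 2 : Nat) : Int) := by exact_mod_cast hh
      push_cast at h'
      nlinarith [h']
    have hs1 : 1 ≤ s := by nlinarith
    have hsC : s ≤ 10000000 := by nlinarith
    have hA : IsGreatest {x | ValidDiv p x} (solnBodyA p) := by
      unfold solnBodyA
      rw [if_neg (by omega : ¬ p = 1), ← hsdef]
      simp only
      exact loopA_greatest p s hp hss hlt hsC (s + 1 - 2).toNat 2 1 rfl (le_refl 2)
        (by omega) (by omega) ⟨one_dvd p, le_refl 1, by omega, by omega⟩ (by omega) hs1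
    exact hA.unique (bodyB_greatest p hp (by omega))

theorem solution_spec : Claim_unchanged_solution := by
  intro b e hdom hpre hnd
  show solution b e = solution_alt b e
  unfold solution solution_alt
  rw [PySem.List.foldl_append_singleton_eq_map, PySem.List.foldl_append_singleton_eq_map,
    List.nil_append, List.nil_append]
  apply List.map_congr_left
  intro x hx
  obtain ⟨hxl, hxr⟩ := PySem.List.mem_pyRange_one.mp hx
  simp only [Dom_solution, pvDomInt, Bool.and_eq_true, decide_eq_true_eq] at hdom
  unfold Pre_solution at hpre
  unfold D_solution at hnd
  exact body_eq x (by omega) (by omega)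

theorem solution_changed : Claim_changed_solution := by
  unfold Claim_changed_solution; decide

theorem solution_tight : Claim_exact_solution := by
  intro b e hdom hpre hD
  obtain ⟨rfl, he0⟩ := hD
  unfold solution solution_alt
  rw [PySem.List.foldl_append_singleton_eq_map, PySem.List.foldl_append_singleton_eq_map,
    List.nil_append, List.nil_append,
    PySem.List.pyRange_one_cons (by omega : (0 : Int) < e + 1)]
  simp only [List.map_cons]
  intro hcontra
  have hhead : solnBodyA 0 = solnBodyB 0 := (List.cons.injEq _ _ _ _).mp hcontra |>.1
  have : solnBodyA 0 = 1 := by decide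
  have : solnBodyB 0 = 0 := by decide
  omega
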